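-- pv_equiv track=rewrite | github.com/MrBrantCode/unitest_baseline | mut_generate/mist_train_taco/taco_8870/solution.py | can_geek_win
-- ===== SOURCE A (Python) =====
-- def can_geek_win(N, X, Y):
--     dp = [False] * (N + 1)
--     dp[1] = True
--
--     for i in range(2, N + 1):
--         if i - X >= 0 and dp[i - X] == False:
--             dp[i] = True
--         elif i - Y >= 0 and dp[i - Y] == False:
--             dp[i] = True
--         elif i - 1 >= 0 and dp[i - 1] == False:
--             dp[i] = True
--         else:
--             dp[i] = False
--
--     return 1 if dp[N] else 0
-- ===== SOURCE B (Python) =====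
-- def can_geek_win(N, X, Y):
--     # Forward (push) DP: propagate winning status from each losing position j
--     # to j+1, j+X, j+Y, instead of scanning the three predecessors of each cell.
--     dp = [False] * (N + 1)
--     for j in range(N + 1):
--         if not dp[j]:
--             for m in (1, X, Y):
--                 if j + m <= N:
--                     dp[j + m] = True
--     return 1 if dp[N] else 0
-- ===== Notes on version B (the rewrite author's own statement) =====
-- stated objective: alternative
-- what changed: Backward pull DP (each cell scans its three predecessors dp[i-1],dp[i-X],dp[i-Y]) replaced by a forward push DP that propagates winning status from each losing position j to j+1, j+X, j+Y.
-- outside the precondition, e.g. on can_geek_win(1, -3, 5): A returns 1, B raises IndexError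
import Mathlib
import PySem

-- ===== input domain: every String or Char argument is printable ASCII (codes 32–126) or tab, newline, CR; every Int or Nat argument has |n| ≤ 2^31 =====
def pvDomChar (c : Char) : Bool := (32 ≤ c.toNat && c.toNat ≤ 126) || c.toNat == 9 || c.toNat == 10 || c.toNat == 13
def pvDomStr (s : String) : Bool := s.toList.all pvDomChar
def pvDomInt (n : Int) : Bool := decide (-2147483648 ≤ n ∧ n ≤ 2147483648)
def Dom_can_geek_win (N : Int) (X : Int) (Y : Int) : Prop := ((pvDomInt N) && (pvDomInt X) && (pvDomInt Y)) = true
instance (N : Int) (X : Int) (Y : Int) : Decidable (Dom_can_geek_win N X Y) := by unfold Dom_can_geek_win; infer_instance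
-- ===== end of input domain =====

-- B replaces A's backward pull DP (each cell scans its three predecessors) by a
-- forward push DP propagating winning status from losing positions (objective: alternative).
-- Python lists are ported as Array Bool; every dp write/read index is in range on Pre_,
-- so Array.setIfInBounds / Array.getD there are exact for Python's dp[i] = v / dp[i].


-- ===== PORT A =====
def can_geek_win (N : Int) (X : Int) (Y : Int) : Int :=
  let dp0 := (Array.replicate (N + 1).toNat false).setIfInBounds 1 true
  let dp := (PySem.List.pyRange 2 (N + 1) 1).foldl (fun dp i =>
      dp.setIfInBounds i.toNat
        (if 0 ≤ i - X ∧ dp.getD (i - X).toNat false = false then true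
         else if 0 ≤ i - Y ∧ dp.getD (i - Y).toNat false = false then true
         else if 0 ≤ i - 1 ∧ dp.getD (i - 1).toNat false = false then true
         else false)) dp0
  if dp.getD N.toNat false then 1 else 0

-- ===== PORT B =====
def can_geek_win_alt (N : Int) (X : Int) (Y : Int) : Int :=
  let dp := (PySem.List.pyRange 0 (N + 1) 1).foldl (fun dp j =>
      if dp.getD j.toNat false = false then
        [(1 : Int), X, Y].foldl (fun dp m =>
          if j + m ≤ N then dp.setIfInBounds (j + m).toNat true else dp) dp
      else dp) (Array.replicate (N + 1).toNat false)
  if dp.getD N.toNat false then 1 else 0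

-- ===== PRECONDITION & SPEC =====
-- Pre_ excludes N ≤ 0, where A raises IndexError (dp[1] on a too-short list), and
-- negative move sizes X or Y, outside the game's domain, where A raises IndexError
-- for every N ≥ 2 and returns only in the degenerate case N = 1 (the loop never runs).
def Pre_can_geek_win (N : Int) (X : Int) (Y : Int) : Prop := 1 ≤ N ∧ 0 ≤ X ∧ 0 ≤ Y
instance (N : Int) (X : Int) (Y : Int) : Decidable (Pre_can_geek_win N X Y) := by unfold Pre_can_geek_win; infer_instance
def pvWitness_can_geek_win : Int × Int × Int := (7, 2, 3)

def Spec_can_geek_win (N : Int) (X : Int) (Y : Int) (out : Int) : Prop := out = can_geek_win_alt N X Y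
instance (N : Int) (X : Int) (Y : Int) (out : Int) : Decidable (Spec_can_geek_win N X Y out) := by unfold Spec_can_geek_win; infer_instance

-- ===== CLAIM (what is proved, stated in full; the proofs are below) =====
def Claim_equal_can_geek_win : Prop := ∀ (N : Int) (X : Int) (Y : Int), Dom_can_geek_win N X Y → Pre_can_geek_win N X Y → Spec_can_geek_win N X Y (can_geek_win N X Y)

-- ===== LEMMAS AND PROOFS =====

lemma getD_set_bool (a : Array Bool) (i k : Nat) (v d : Bool) (hi : i < a.size) :
    (a.setIfInBounds i v).getD k d = if k = i then v else a.getD k d := by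
  rw [Array.getD_eq_getD_getElem?, Array.getD_eq_getD_getElem?, Array.getElem?_setIfInBounds]
  by_cases h : k = i
  · simp [h, hi]
  · rw [if_neg (fun he : i = k => h he.symm), if_neg h]

lemma getD_replicate_bool (n k : Nat) (d : Bool) :
    (Array.replicate n false).getD k d = if k < n then false else d := by
  unfold Array.getD
  split_ifs with h1 h2 <;> simp_all
  simp at h1
  omega

-- Reference winning predicate of the subtraction game with moves {1, x, y} (x, y ≥ 1).
def win (x y : Nat) : Nat → Bool
  | 0 => false
  | (i+1) =>
    (if _h : 0 < x ∧ x ≤ i + 1 then !win x y (i + 1 - x) else false) ||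
    ((if _h : 0 < y ∧ y ≤ i + 1 then !win x y (i + 1 - y) else false) ||
     !win x y i)
termination_by i => i
decreasing_by all_goals omega

-- partial push status: positions marked winning after processing j' = 0 .. t-1
def pwin (x y t k : Nat) : Bool :=
  decide (∃ j' < t, win x y j' = false ∧ (k = j' + 1 ∨ k = j' + x ∨ k = j' + y))

lemma pwin_zero (x y k : Nat) : pwin x y 0 k = false := by simp [pwin]

lemma pwin_succ (x y t k : Nat) :
    pwin x y (t+1) k =
      (pwin x y t k || (!win x y t && decide (k = t + 1 ∨ k = t + x ∨ k = t + y))) := by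
  rw [Bool.eq_iff_iff]
  simp only [pwin, Bool.or_eq_true, Bool.and_eq_true, Bool.not_eq_eq_eq_not, Bool.not_true,
    decide_eq_true_eq]
  constructor
  · rintro ⟨j', hj, hf, hk⟩
    rcases Nat.lt_succ_iff_lt_or_eq.mp hj with h | rfl
    · exact Or.inl ⟨j', h, hf, hk⟩
    · exact Or.inr ⟨hf, hk⟩
  · rintro (⟨j', hj, hf, hk⟩ | ⟨hf, hk⟩)
    · exact ⟨j', Nat.lt_succ_of_lt hj, hf, hk⟩
    · exact ⟨t, Nat.lt_succ_self t, hf, hk⟩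

lemma win_eq_pwin (x y : Nat) (hx : 1 ≤ x) (hy : 1 ≤ y) (t : Nat) :
    win x y t = pwin x y t t := by
  cases t with
  | zero => simp [win, pwin]
  | succ i =>
    rw [win, Bool.eq_iff_iff]
    simp only [pwin, Bool.or_eq_true, decide_eq_true_eq, Bool.not_eq_eq_eq_not, Bool.not_true]
    constructor
    · rintro (h | h | h)
      · by_cases hc : 0 < x ∧ x ≤ i + 1
        · rw [dif_pos hc] at h
          exact ⟨i + 1 - x, by omega, by simpa using h, by omega⟩
        · rw [dif_neg hc] at h; simp at h
      · by_cases hc : 0 < y ∧ y ≤ i + 1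
        · rw [dif_pos hc] at h
          exact ⟨i + 1 - y, by omega, by simpa using h, by omega⟩
        · rw [dif_neg hc] at h; simp at h
      · exact ⟨i, by omega, by simpa using h, by omega⟩
    · rintro ⟨j', hj, hf, (hk | hk | hk)⟩
      · refine Or.inr (Or.inr ?_); simp [show i = j' by omega, hf]
      · refine Or.inl ?_
        have hc : 0 < x ∧ x ≤ i + 1 := by omega
        simp [hc, show i + 1 - x = j' by omega, hf]
      · refine Or.inr (Or.inl ?_)
        have hc : 0 < y ∧ y ≤ i + 1 := by omega
        simp [hc, show i + 1 - y = j' by omega, hf]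

lemma win_one (x y : Nat) : win x y 1 = true := by
  rw [win]; simp [win]

-- ----- A side -----

lemma A_fold (n x y : Nat) (hn : 1 ≤ n) (hx : 1 ≤ x) (hy : 1 ≤ y) :
    ∀ m : Nat, 1 ≤ m → m ≤ n →
      (((PySem.List.pyRange 2 ((m : Int) + 1) 1).foldl (fun dp i =>
        dp.setIfInBounds i.toNat
          (if 0 ≤ i - (x : Int) ∧ dp.getD (i - (x : Int)).toNat false = false then true
           else if 0 ≤ i - (y : Int) ∧ dp.getD (i - (y : Int)).toNat false = false then true
           else if 0 ≤ i - 1 ∧ dp.getD (i - 1).toNat false = false then true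
           else false))
        ((Array.replicate (n + 1) false).setIfInBounds 1 true)).size = n + 1 ∧
       ∀ k : Nat, k ≤ m →
      ((PySem.List.pyRange 2 ((m : Int) + 1) 1).foldl (fun dp i =>
        dp.setIfInBounds i.toNat
          (if 0 ≤ i - (x : Int) ∧ dp.getD (i - (x : Int)).toNat false = false then true
           else if 0 ≤ i - (y : Int) ∧ dp.getD (i - (y : Int)).toNat false = false then true
           else if 0 ≤ i - 1 ∧ dp.getD (i - 1).toNat false = false then true
           else false))
        ((Array.replicate (n + 1) false).setIfInBounds 1 true)).getD k false = win x y k) := by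
  intro m
  induction m with
  | zero => intro h; omega
  | succ m ih =>
    intro _ hmn
    rcases Nat.eq_or_lt_of_le (show 1 ≤ m + 1 from by omega) with h1 | h1
    · -- base case m + 1 = 1
      have hm0 : m = 0 := by omega
      subst hm0
      rw [show ((0 + 1 : Nat) : Int) + 1 = 2 by norm_num, PySem.List.pyRange_one_eq_nil (le_refl 2)]
      simp only [List.foldl_nil]
      refine ⟨by simp, ?_⟩
      intro k hk
      rw [getD_set_bool _ _ _ _ _ (by simp; omega)]
      interval_cases k
      · simp [win]
      · simp [win_one]
    · -- step: m ≥ 1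
      have hm1 : 1 ≤ m := by omega
      obtain ⟨hlen, hval⟩ := ih hm1 (by omega)
      rw [show ((m + 1 : Nat) : Int) + 1 = ((m : Int) + 1) + 1 by push_cast; ring,
        PySem.List.pyRange_one_succ_right (by omega), List.foldl_append]
      simp only [List.foldl_cons, List.foldl_nil]
      set L := (PySem.List.pyRange 2 ((m : Int) + 1) 1).foldl _ _ with hL
      -- the value written at index m+1 is win x y (m+1)
      have hvwrite :
          (if 0 ≤ ((m : Int) + 1) - (x : Int) ∧ L.getD (((m : Int) + 1) - (x : Int)).toNat false = false then true
           else if 0 ≤ ((m : Int) + 1) - (y : Int) ∧ L.getD (((m : Int) + 1) - (y : Int)).toNat false = false then true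
           else if 0 ≤ ((m : Int) + 1) - 1 ∧ L.getD (((m : Int) + 1) - 1).toNat false = false then true
           else false) = win x y (m + 1) := by
        have hget : ∀ z : Nat, z ≤ m + 1 → 1 ≤ z →
            L.getD (((m : Int) + 1) - (z : Int)).toNat false = win x y (m + 1 - z) := by
          intro z hz hz1
          rw [show (((m : Int) + 1) - (z : Int)).toNat = m + 1 - z by omega, hval _ (by omega)]
        rw [win]
        by_cases hxc : x ≤ m + 1
        · rw [dif_pos (by omega), hget x hxc hx]
          by_cases hwx : win x y (m + 1 - x) = false
          · rw [if_pos ⟨by omega, hwx⟩]; simp [hwx]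
          · rw [if_neg (by tauto)]
            simp only [Bool.not_eq_false] at hwx
            simp only [hwx, Bool.not_true, Bool.false_or]
            by_cases hyc : y ≤ m + 1
            · rw [dif_pos (by omega), hget y hyc hy]
              by_cases hwy : win x y (m + 1 - y) = false
              · rw [if_pos ⟨by omega, hwy⟩]; simp [hwy]
              · rw [if_neg (by tauto)]
                simp only [Bool.not_eq_false] at hwy
                simp only [hwy, Bool.not_true, Bool.false_or]
                have h1get : L.getD (((m : Int) + 1) - 1).toNat false = win x y m := by
                  have := hget 1 (by omega) (le_refl 1); simpa using this
                by_cases hw1 : win x y m = false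
                · rw [if_pos ⟨by omega, by rw [h1get]; exact hw1⟩]; simp [hw1]
                · rw [if_neg (by rw [h1get]; tauto)]
                  simp only [Bool.not_eq_false] at hw1; simp [hw1]
            · rw [dif_neg (by omega), if_neg (by intro hc; omega), Bool.false_or]
              have h1get : L.getD (((m : Int) + 1) - 1).toNat false = win x y m := by
                have := hget 1 (by omega) (le_refl 1); simpa using this
              by_cases hw1 : win x y m = false
              · rw [if_pos ⟨by omega, by rw [h1get]; exact hw1⟩]; simp [hw1]
              · rw [if_neg (by rw [h1get]; tauto)]
                simp only [Bool.not_eq_false] at hw1; simp [hw1]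
        · rw [dif_neg (by omega), if_neg (by intro hc; omega), Bool.false_or]
          by_cases hyc : y ≤ m + 1
          · rw [dif_pos (by omega), hget y hyc hy]
            by_cases hwy : win x y (m + 1 - y) = false
            · rw [if_pos ⟨by omega, hwy⟩]; simp [hwy]
            · rw [if_neg (by tauto)]
              simp only [Bool.not_eq_false] at hwy
              simp only [hwy, Bool.not_true, Bool.false_or]
              have h1get : L.getD (((m : Int) + 1) - 1).toNat false = win x y m := by
                have := hget 1 (by omega) (le_refl 1); simpa using this
              by_cases hw1 : win x y m = false
              · rw [if_pos ⟨by omega, by rw [h1get]; exact hw1⟩]; simp [hw1]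
              · rw [if_neg (by rw [h1get]; tauto)]
                simp only [Bool.not_eq_false] at hw1; simp [hw1]
          · rw [dif_neg (by omega), if_neg (by intro hc; omega), Bool.false_or]
            have h1get : L.getD (((m : Int) + 1) - 1).toNat false = win x y m := by
              have hg := hget 1 (by omega) (le_refl 1); simpa using hg
            by_cases hw1 : win x y m = false
            · rw [if_pos ⟨by omega, by rw [h1get]; exact hw1⟩]; simp [hw1]
            · rw [if_neg (by rw [h1get]; tauto)]
              simp only [Bool.not_eq_false] at hw1; simp [hw1]
      rw [hvwrite]
      rw [show (((m : Int) + 1)).toNat = m + 1 by omega]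
      constructor
      · rw [Array.size_setIfInBounds, hlen]
      · intro k hk
        rw [getD_set_bool _ _ _ _ _ (by rw [hlen]; omega)]
        by_cases hkm : k = m + 1
        · simp [hkm]
        · rw [if_neg hkm, hval _ (by omega)]

-- the A fold preserves the array size for arbitrary x, y
lemma A_fold_len (n x y : Nat) :
    ∀ m : Nat,
      ((PySem.List.pyRange 2 ((m : Int) + 1) 1).foldl (fun dp i =>
        dp.setIfInBounds i.toNat
          (if 0 ≤ i - (x : Int) ∧ dp.getD (i - (x : Int)).toNat false = false then true
           else if 0 ≤ i - (y : Int) ∧ dp.getD (i - (y : Int)).toNat false = false then true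
           else if 0 ≤ i - 1 ∧ dp.getD (i - 1).toNat false = false then true
           else false))
        ((Array.replicate (n + 1) false).setIfInBounds 1 true)).size = n + 1 := by
  intro m
  induction m with
  | zero =>
    rw [show ((0 : Nat) : Int) + 1 = 1 by norm_num, PySem.List.pyRange_one_eq_nil (by norm_num)]
    simp
  | succ m ih =>
    by_cases hm0 : m = 0
    · subst hm0
      rw [show ((0 + 1 : Nat) : Int) + 1 = 2 by norm_num, PySem.List.pyRange_one_eq_nil (le_refl 2)]
      simp
    · rw [show ((m + 1 : Nat) : Int) + 1 = ((m : Int) + 1) + 1 by push_cast; ring,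
        PySem.List.pyRange_one_succ_right (by omega), List.foldl_append]
      simp only [List.foldl_cons, List.foldl_nil, Array.size_setIfInBounds, ih]

-- with x = 0 or y = 0, A's dp becomes true at every position 1..m (self-referential read)
lemma A_zero (n x y : Nat) (hn : 1 ≤ n) (hxy : x = 0 ∨ y = 0) :
    ∀ m : Nat, 1 ≤ m → m ≤ n →
      ∀ k : Nat, k ≤ n →
      ((PySem.List.pyRange 2 ((m : Int) + 1) 1).foldl (fun dp i =>
        dp.setIfInBounds i.toNat
          (if 0 ≤ i - (x : Int) ∧ dp.getD (i - (x : Int)).toNat false = false then true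
           else if 0 ≤ i - (y : Int) ∧ dp.getD (i - (y : Int)).toNat false = false then true
           else if 0 ≤ i - 1 ∧ dp.getD (i - 1).toNat false = false then true
           else false))
        ((Array.replicate (n + 1) false).setIfInBounds 1 true)).getD k false
        = decide (1 ≤ k ∧ k ≤ m) := by
  intro m
  induction m with
  | zero => intro h; omega
  | succ m ih =>
    intro _ hmn k hk
    rcases Nat.eq_or_lt_of_le (show 1 ≤ m + 1 from by omega) with h1 | h1
    · have hm0 : m = 0 := by omega
      subst hm0
      rw [show ((0 + 1 : Nat) : Int) + 1 = 2 by norm_num, PySem.List.pyRange_one_eq_nil (le_refl 2)]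
      simp only [List.foldl_nil]
      rw [getD_set_bool _ _ _ _ _ (by simp; omega), getD_replicate_bool]
      by_cases hk1 : k = 1
      · simp [hk1]
      · rw [if_neg hk1, if_pos (by omega)]
        simp; omega
    · have hm1 : 1 ≤ m := by omega
      rw [show ((m + 1 : Nat) : Int) + 1 = ((m : Int) + 1) + 1 by push_cast; ring,
        PySem.List.pyRange_one_succ_right (by omega), List.foldl_append]
      simp only [List.foldl_cons, List.foldl_nil]
      set L := (PySem.List.pyRange 2 ((m : Int) + 1) 1).foldl _ _ with hL
      have hLlen : L.size = n + 1 := by rw [hL]; exact A_fold_len n x y m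
      have hval : ∀ k : Nat, k ≤ n → L.getD k false = decide (1 ≤ k ∧ k ≤ m) :=
        fun k hk => ih hm1 (by omega) k hk
      have hvwrite :
          (if 0 ≤ ((m : Int) + 1) - (x : Int) ∧ L.getD (((m : Int) + 1) - (x : Int)).toNat false = false then true
           else if 0 ≤ ((m : Int) + 1) - (y : Int) ∧ L.getD (((m : Int) + 1) - (y : Int)).toNat false = false then true
           else if 0 ≤ ((m : Int) + 1) - 1 ∧ L.getD (((m : Int) + 1) - 1).toNat false = false then true
           else false) = true := by
        have hget : ∀ z : Nat, z ≤ m + 1 →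
            L.getD (((m : Int) + 1) - (z : Nat)).toNat false = decide (1 ≤ m + 1 - z ∧ m + 1 - z ≤ m) := by
          intro z hz
          rw [show (((m : Int) + 1) - (z : Nat)).toNat = m + 1 - z by omega, hval _ (by omega)]
        rcases hxy with hx0 | hy0
        · subst hx0
          rw [if_pos ⟨by push_cast; omega,
            by rw [hget 0 (by omega)]; simp only [decide_eq_false_iff_not]; omega⟩]
        · subst hy0
          by_cases hc1 : 0 ≤ ((m : Int) + 1) - (x : Int) ∧ L.getD (((m : Int) + 1) - (x : Int)).toNat false = false
          · rw [if_pos hc1]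
          · rw [if_neg hc1, if_pos ⟨by push_cast; omega,
              by rw [hget 0 (by omega)]; simp only [decide_eq_false_iff_not]; omega⟩]
      rw [hvwrite, show (((m : Int) + 1)).toNat = m + 1 by omega,
        getD_set_bool _ _ _ _ _ (by rw [hLlen]; omega)]
      by_cases hkm : k = m + 1
      · simp [hkm]
      · rw [if_neg hkm, hval _ hk]
        simp only [decide_eq_decide]
        omega

-- ----- B side -----

-- marking step of B: size and pointwise effect
lemma mark_len (t z : Nat) (n : Int) (M : Array Bool) :
    ((if (t : Int) + (z : Nat) ≤ n then M.setIfInBounds ((t : Int) + (z : Nat)).toNat true else M)).size = M.size := by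
  split_ifs with hc
  · rw [Array.size_setIfInBounds]
  · rfl

lemma mark_getD (n t z : Nat) (M : Array Bool) (hMl : M.size = n + 1) (k : Nat) (hk : k ≤ n) :
    ((if (t : Int) + (z : Nat) ≤ (n : Int) then M.setIfInBounds ((t : Int) + (z : Nat)).toNat true else M)).getD k false
      = if k = t + z then true else M.getD k false := by
  by_cases hc : (t : Int) + (z : Nat) ≤ (n : Int)
  · rw [if_pos hc, show (((t : Int) + (z : Nat))).toNat = t + z by omega,
      getD_set_bool _ _ _ _ _ (by rw [hMl]; omega)]
  · rw [if_neg hc, if_neg (by intro h; omega)]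

lemma B_fold (n x y : Nat) (hx : 1 ≤ x) (hy : 1 ≤ y) :
    ∀ t : Nat, t ≤ n + 1 →
      (((PySem.List.pyRange 0 (t : Int) 1).foldl (fun dp j =>
        if dp.getD j.toNat false = false then
          [(1 : Int), (x : Int), (y : Int)].foldl (fun dp m =>
            if j + m ≤ (n : Int) then dp.setIfInBounds (j + m).toNat true else dp) dp
        else dp) (Array.replicate (n + 1) false)).size = n + 1 ∧
       ∀ k : Nat, k ≤ n →
      ((PySem.List.pyRange 0 (t : Int) 1).foldl (fun dp j =>
        if dp.getD j.toNat false = false then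
          [(1 : Int), (x : Int), (y : Int)].foldl (fun dp m =>
            if j + m ≤ (n : Int) then dp.setIfInBounds (j + m).toNat true else dp) dp
        else dp) (Array.replicate (n + 1) false)).getD k false = pwin x y t k) := by
  intro t
  induction t with
  | zero =>
    intro _
    rw [show ((0 : Nat) : Int) = 0 by norm_num, PySem.List.pyRange_one_eq_nil (le_refl 0)]
    simp only [List.foldl_nil]
    refine ⟨by simp, ?_⟩
    intro k hk
    rw [getD_replicate_bool, if_pos (by omega), pwin_zero]
  | succ t ih =>
    intro ht
    obtain ⟨hlen, hval⟩ := ih (by omega)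
    rw [show ((t + 1 : Nat) : Int) = (t : Int) + 1 by push_cast; ring,
      PySem.List.pyRange_one_succ_right (by positivity), List.foldl_append]
    simp only [List.foldl_cons, List.foldl_nil] at hlen hval ⊢
    set L := (PySem.List.pyRange 0 (t : Int) 1).foldl _ _ with hL
    have hread : L.getD ((t : Int)).toNat false = win x y t := by
      rw [show (((t : Nat) : Int)).toNat = t by omega, hval t (by omega), ← win_eq_pwin x y hx hy]
    by_cases hw : win x y t = false
    · rw [if_pos (by rw [hread, hw])]
      rw [show ((t : Int) + 1) = ((t : Int) + ((1 : Nat) : Int)) by norm_num]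
      have hlen1 := mark_len t 1 (n : Int) L
      have hlen2 := mark_len t x (n : Int) (if (t : Int) + ((1 : Nat) : Int) ≤ (n : Int) then L.setIfInBounds ((t : Int) + ((1 : Nat) : Int)).toNat true else L)
      refine ⟨by rw [mark_len, mark_len, mark_len, hlen], ?_⟩
      intro k hk
      rw [mark_getD n t y _ (by rw [mark_len, mark_len, hlen]) k hk,
          mark_getD n t x _ (by rw [mark_len, hlen]) k hk,
          mark_getD n t 1 _ hlen k hk]
      by_cases hky : k = t + y
      · rw [pwin_succ, hw]; simp [hky]
      · rw [if_neg hky]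
        by_cases hkx : k = t + x
        · rw [pwin_succ, hw]; simp [hkx]
        · rw [if_neg hkx]
          by_cases hk1 : k = t + 1
          · rw [pwin_succ, hw]; simp [hk1]
          · rw [if_neg hk1, hval k hk, pwin_succ, hw]
            simp [hk1, hkx, hky]
    · simp only [Bool.not_eq_false] at hw
      rw [if_neg (by rw [hread, hw]; simp)]
      refine ⟨hlen, ?_⟩
      intro k hk
      rw [hval k hk, pwin_succ, hw]
      simp

-- the B fold preserves the array size for arbitrary x, y
lemma B_len (n x y : Nat) :
    ∀ t : Nat,
      ((PySem.List.pyRange 0 (t : Int) 1).foldl (fun dp j =>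
        if dp.getD j.toNat false = false then
          [(1 : Int), (x : Int), (y : Int)].foldl (fun dp m =>
            if j + m ≤ (n : Int) then dp.setIfInBounds (j + m).toNat true else dp) dp
        else dp) (Array.replicate (n + 1) false)).size = n + 1 := by
  intro t
  induction t with
  | zero =>
    rw [show ((0 : Nat) : Int) = 0 by norm_num, PySem.List.pyRange_one_eq_nil (le_refl 0)]
    simp
  | succ t ih =>
    rw [show ((t + 1 : Nat) : Int) = (t : Int) + 1 by push_cast; ring,
      PySem.List.pyRange_one_succ_right (by positivity), List.foldl_append]
    simp only [List.foldl_cons, List.foldl_nil] at ih ⊢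
    set L := (PySem.List.pyRange 0 (t : Int) 1).foldl _ _ with hL
    split_ifs <;>
      simp only [Array.size_setIfInBounds, ih]

-- with x = 0 or y = 0, B's self-marking makes position n winning
lemma B_zero (n x y : Nat) (hxy : x = 0 ∨ y = 0) :
    ((PySem.List.pyRange 0 ((n + 1 : Nat) : Int) 1).foldl (fun dp j =>
      if dp.getD j.toNat false = false then
        [(1 : Int), (x : Int), (y : Int)].foldl (fun dp m =>
          if j + m ≤ (n : Int) then dp.setIfInBounds (j + m).toNat true else dp) dp
      else dp) (Array.replicate (n + 1) false)).getD n false = true := by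
  rw [show ((n + 1 : Nat) : Int) = (n : Int) + 1 by push_cast; ring,
    PySem.List.pyRange_one_succ_right (by positivity), List.foldl_append]
  have hMl := B_len n x y n
  simp only [List.foldl_cons, List.foldl_nil] at hMl ⊢
  set M := (PySem.List.pyRange 0 (n : Int) 1).foldl _ _ with hM
  by_cases hc : M.getD ((n : Int)).toNat false = false
  · rw [if_pos hc]
    rw [show ((n : Int) + 1) = ((n : Int) + ((1 : Nat) : Int)) by norm_num]
    rw [mark_getD n n y _ (by rw [mark_len, mark_len, hMl]) n (le_refl n),
        mark_getD n n x _ (by rw [mark_len, hMl]) n (le_refl n)]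
    rcases hxy with h0 | h0 <;> subst h0 <;> split_ifs <;> first | rfl | omega
  · rw [if_neg hc]
    rw [show (((n : Nat) : Int)).toNat = n by omega] at hc
    simpa using hc

-- ===== VERDICT (by name: the statement is the Claim_ definition above) =====
theorem can_geek_win_spec : Claim_equal_can_geek_win := by
  intro N X Y _hdom hpre
  obtain ⟨hN, hX, hY⟩ := hpre
  unfold Spec_can_geek_win
  obtain ⟨n, rfl⟩ : ∃ m : Nat, N = (m : Int) := ⟨N.toNat, (Int.toNat_of_nonneg (by omega)).symm⟩
  obtain ⟨x, rfl⟩ : ∃ m : Nat, X = (m : Int) := ⟨X.toNat, (Int.toNat_of_nonneg (by omega)).symm⟩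
  obtain ⟨y, rfl⟩ : ∃ m : Nat, Y = (m : Int) := ⟨Y.toNat, (Int.toNat_of_nonneg (by omega)).symm⟩
  have hn : 1 ≤ n := by exact_mod_cast hN
  unfold can_geek_win can_geek_win_alt
  simp only []
  rw [show ((n : Int) + 1).toNat = n + 1 by omega]
  rw [show (((n : Nat) : Int)).toNat = n by omega]
  rw [show ((n : Int) + 1) = ((n + 1 : Nat) : Int) by push_cast; ring]
  by_cases hxy : x = 0 ∨ y = 0
  · -- a zero move marks every position (including n) winning in both programs
    have hA :
        ((PySem.List.pyRange 2 ((n + 1 : Nat) : Int) 1).foldl (fun dp i =>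
          dp.setIfInBounds i.toNat
            (if 0 ≤ i - (x : Int) ∧ dp.getD (i - (x : Int)).toNat false = false then true
             else if 0 ≤ i - (y : Int) ∧ dp.getD (i - (y : Int)).toNat false = false then true
             else if 0 ≤ i - 1 ∧ dp.getD (i - 1).toNat false = false then true
             else false))
          ((Array.replicate (n + 1) false).setIfInBounds 1 true)).getD n false = true := by
      rw [show ((n + 1 : Nat) : Int) = ((n : Int) + 1) by push_cast; ring,
        A_zero n x y hn hxy n hn (le_refl n) n (le_refl n)]
      simp [hn]
    rw [hA, B_zero n x y hxy]
  · rw [not_or] at hxy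
    have hx : 1 ≤ x := by omega
    have hy : 1 ≤ y := by omega
    obtain ⟨_, hA⟩ := A_fold n x y hn hx hy n hn (le_refl n)
    obtain ⟨_, hB⟩ := B_fold n x y hx hy (n + 1) (le_refl (n + 1))
    rw [show ((n : Int) + 1) = ((n + 1 : Nat) : Int) by push_cast; ring] at hA
    rw [hA n (le_refl n), hB n (le_refl n)]
    have hpw : pwin x y (n + 1) n = win x y n := by
      rw [pwin_succ]
      rw [show (decide (n = n + 1 ∨ n = n + x ∨ n = n + y)) = false by
        simp only [decide_eq_false_iff_not]; omega]
      rw [win_eq_pwin x y hx hy n]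
      simp
    rw [hpw]
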